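-- pv_equiv track=rewrite | github.com/lalithach/DS | recursion_problems/subset_duplicates.py | get_distinct_subsets
-- ===== SOURCE A (Python) =====
-- def get_distinct_subsets(s):
--     """
--     Args:
--      s(str)
--     Returns:
--      list_str
--     """
--     arr = [char for char in s]
--     arr.sort()
--     result = []
--     def helper(slate, arr, index):
--         # Leaf node
--         if index == len(arr):
--             result.append("".join(slate))
--             return
--
--         # Internal node workers
--         # Get the count of a specific element, thats why sort all
--         # the elements first
--         count = 0
--         for pick in range(index, len(arr)):
--             if arr[index] == arr[pick]:
--                 count+=1
--         # Exclude choice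
--         # subordinate should get the element after all duplicates
--         # So, index+count
--         helper(slate, arr, index+count)
--
--         # Include choice
--         # Iterate over all duplicate choices
--         for pick in range(0, count):
--             slate.append(arr[index])
--             helper(slate, arr, index+count)
--             # pop is skipped here, as the other nodes in same level
--             # should have the previous choice appended
--
--         # pop all of them while returning back to higher manager
--         for pick in range(0, count):
--             slate.pop()
--
--     helper([],arr, 0)
--     return result
-- ===== SOURCE B (Python) =====
-- def get_distinct_subsets(s):
--     """
--     Args:
--      s(str)
--     Returns:
--      list_str
--     """
--     rest = sorted(s)
--     result = [""]
--     while rest: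
--         c = rest[0]
--         k = 0
--         while rest and rest[0] == c:
--             rest.pop(0)
--             k += 1
--         result = [r + c * t for r in result for t in range(k + 1)]
--     return result
-- ===== Notes on version B (the rewrite author's own statement) =====
-- stated objective: simpler
-- what changed: A enumerates subsets by recursive include/exclude backtracking with a mutable slate and an inner duplicate-count scan; B iterates once over the runs of the sorted characters, rebuilding the result list as the product with 0..k copies of each run's character.
import Mathlib
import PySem

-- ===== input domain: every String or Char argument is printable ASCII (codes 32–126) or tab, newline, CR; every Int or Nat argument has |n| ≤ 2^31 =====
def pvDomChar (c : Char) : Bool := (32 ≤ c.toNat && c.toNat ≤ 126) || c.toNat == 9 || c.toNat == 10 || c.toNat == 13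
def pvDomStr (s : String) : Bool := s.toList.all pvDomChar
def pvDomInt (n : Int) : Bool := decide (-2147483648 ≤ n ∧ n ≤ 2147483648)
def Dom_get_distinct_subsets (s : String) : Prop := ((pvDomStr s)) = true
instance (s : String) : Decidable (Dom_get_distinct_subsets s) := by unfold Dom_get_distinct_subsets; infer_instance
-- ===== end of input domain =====

-- B replaces A's recursive include/exclude backtracking by an iterative product over
-- (char, run-length) groups of the sorted characters; same values, same order (objective: simpler).

-- ===== PORT A =====
-- count loop: 'count = 0; for pick in range(index, len(arr)): if arr[index]==arr[pick]: count += 1'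
-- (the fixed array arr with index is represented by the suffix arr[index:], scanned in the same order)
def pvCountEq (x : Char) (l : List Char) : Nat :=
  l.foldl (fun cnt y => if x == y then cnt + 1 else cnt) 0

-- termination fact the port's recursion needs: the count includes arr[index] itself
theorem pvCountEq_foldl_ge (x : Char) (l : List Char) :
    ∀ n : Nat, n ≤ l.foldl (fun cnt y => if x == y then cnt + 1 else cnt) n := by
  induction l with
  | nil => intro n; simp
  | cons y tl ih =>
      intro n
      simp only [List.foldl_cons]
      split
      · exact Nat.le_trans (Nat.le_succ n) (ih (n + 1))
      · exact ih n

theorem pvCountEq_pos (x : Char) (tl : List Char) : 1 ≤ pvCountEq x (x :: tl) := by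
  unfold pvCountEq
  simp only [List.foldl_cons, BEq.rfl, if_true]
  exact pvCountEq_foldl_ge x tl 1

def pvHelperA (slate : List Char) (l : List Char) : List String :=
  match l with
  | [] => [String.ofList slate]                       -- result.append("".join(slate))
  | x :: tl =>
      let count := pvCountEq x (x :: tl)
      let l' := (x :: tl).drop count              -- recursion at index + count
      pvHelperA slate l' ++                       -- exclude choice
        (((List.range count).map                  -- include loop, slate grows each iteration
            (fun p => pvHelperA (slate ++ List.replicate (p + 1) x) l')).flatten)
termination_by l.length
decreasing_by
  all_goals
    simp only [List.length_drop, List.length_cons]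
    have h1 := pvCountEq_pos x tl
    omega

def get_distinct_subsets (s : String) : List String :=
  pvHelperA [] (PySem.List.sorted s.toList (fun c => c) false)

-- ===== PORT B =====
def pvAltLoop (rest : List Char) (result : List String) : List String :=
  match rest with
  | [] => result
  | c :: tl =>
      let k := 1 + (tl.takeWhile (fun y => y == c)).length   -- inner while: pop run of c
      let rest' := tl.dropWhile (fun y => y == c)
      pvAltLoop rest'
        (result.flatMap (fun r => (List.range (k + 1)).map
          (fun t => r ++ String.ofList (List.replicate t c))))   -- [r + c*t for r in result for t in range(k+1)]
termination_by rest.length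
decreasing_by
  simp only [List.length_cons]
  have := List.length_dropWhile_le (fun y => y == c) tl
  omega

def get_distinct_subsets_alt (s : String) : List String :=
  pvAltLoop (PySem.List.sorted s.toList (fun c => c) false) [""]

-- ===== PRECONDITION & SPEC =====
def Spec_get_distinct_subsets (s : String) (out : List String) : Prop := out = get_distinct_subsets_alt s
instance (s : String) (out : List String) : Decidable (Spec_get_distinct_subsets s out) := by unfold Spec_get_distinct_subsets; infer_instance

-- ===== CLAIM (what is proved, stated in full; the proofs are below) =====
def Claim_equal_get_distinct_subsets : Prop := ∀ (s : String), Dom_get_distinct_subsets s → Spec_get_distinct_subsets s (get_distinct_subsets s)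

-- ===== LEMMAS AND PROOFS =====

-- common specification: distinct subsets of a run-grouped list, outer group slowest
def pvSS (l : List Char) : List (List Char) :=
  match l with
  | [] => [[]]
  | x :: tl =>
      let k := 1 + (tl.takeWhile (fun y => y == x)).length
      let rest' := tl.dropWhile (fun y => y == x)
      (List.range (k + 1)).flatMap (fun j => (pvSS rest').map (fun t => List.replicate j x ++ t))
termination_by l.length
decreasing_by
  simp only [List.length_cons]
  have := List.length_dropWhile_le (fun y => y == x) tl
  omega

theorem pvCountEq_eq_countP (x : Char) (l : List Char) :
    pvCountEq x l = l.countP (fun y => x == y) := by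
  unfold pvCountEq
  have h : ∀ (l : List Char) (n : Nat),
      l.foldl (fun cnt y => if x == y then cnt + 1 else cnt) n = n + l.countP (fun y => x == y) := by
    intro l
    induction l with
    | nil => intro n; simp
    | cons y tl ih =>
        intro n
        simp only [List.foldl_cons, List.countP_cons]
        split <;> rename_i h <;> simp [h] at * <;> rw [ih] <;> omega
  rw [h]; omega

theorem pvCountP_sorted (x : Char) (tl : List Char)
    (hs : tl.Pairwise (· ≤ ·)) (hge : ∀ y ∈ tl, x ≤ y) :
    tl.countP (fun y => x == y) = (tl.takeWhile (fun y => y == x)).length := by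
  induction tl with
  | nil => simp
  | cons y ys ih =>
      by_cases hxy : y = x
      · subst hxy
        simp only [List.countP_cons, List.takeWhile_cons, BEq.rfl, if_true, beq_self_eq_true,
          List.length_cons]
        rw [ih (hs.of_cons) (fun z hz => hge z (List.mem_cons_of_mem _ hz))]
      · have hlt : x < y := lt_of_le_of_ne (hge y (List.mem_cons_self)) (fun h => hxy h.symm)
        have hzero : ys.countP (fun z => x == z) = 0 := by
          rw [List.countP_eq_zero]
          intro z hz
          have : y ≤ z := (List.pairwise_cons.mp hs).1 z hz
          simp only [beq_iff_eq]
          exact fun h => absurd (h ▸ this) (not_le_of_gt hlt)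
        simp only [List.countP_cons, List.takeWhile_cons]
        have hb1 : (x == y) = false := by simp [hxy]; exact fun h => hxy h.symm
        have hb2 : (y == x) = false := by simp [hxy]
        simp [hb1, hb2, hzero]

theorem pvCountEq_sorted (x : Char) (tl : List Char) (hs : (x :: tl).Pairwise (· ≤ ·)) :
    pvCountEq x (x :: tl) = 1 + (tl.takeWhile (fun y => y == x)).length := by
  rw [pvCountEq_eq_countP]
  simp only [List.countP_cons, BEq.rfl, if_true, beq_self_eq_true]
  rw [pvCountP_sorted x tl hs.of_cons (List.pairwise_cons.mp hs).1]
  omega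

theorem pvDrop_takeWhile (tl : List Char) (p : Char → Bool) :
    tl.drop (tl.takeWhile p).length = tl.dropWhile p := by
  induction tl with
  | nil => simp
  | cons y ys ih =>
      by_cases h : p y
      · simp [List.takeWhile_cons, List.dropWhile_cons, h, ih]
      · simp [List.takeWhile_cons, List.dropWhile_cons, h]

-- A's recursion computes pvSS, prefixed by the current slate
theorem pvHelperA_eq (n : Nat) :
    ∀ l : List Char, l.length ≤ n → l.Pairwise (· ≤ ·) → ∀ slate : List Char,
      pvHelperA slate l = (pvSS l).map (fun t => String.ofList (slate ++ t)) := by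
  induction n with
  | zero =>
      intro l hl _ slate
      have : l = [] := List.eq_nil_of_length_eq_zero (Nat.le_zero.mp hl)
      subst this
      simp [pvHelperA, pvSS]
  | succ n ih =>
      intro l hl hs slate
      match l with
      | [] => simp [pvHelperA, pvSS]
      | x :: tl =>
          have hcount := pvCountEq_sorted x tl hs
          have hdrop : (x :: tl).drop (1 + (tl.takeWhile (fun y => y == x)).length) = tl.dropWhile (fun y => y == x) := by
            rw [Nat.add_comm, List.drop_succ_cons]
            exact pvDrop_takeWhile tl _
          have hsub : (tl.dropWhile (fun y => y == x)).Sublist (x :: tl) :=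
            (List.dropWhile_sublist _).trans (List.sublist_cons_self x tl)
          have hs' : (tl.dropWhile (fun y => y == x)).Pairwise (· ≤ ·) := hs.sublist hsub
          have hlen : (tl.dropWhile (fun y => y == x)).length ≤ n := by
            have := List.length_dropWhile_le (fun y => y == x) tl
            simp only [List.length_cons] at hl
            omega
          have ihd := fun slate => ih (tl.dropWhile (fun y => y == x)) hlen hs' slate
          rw [pvHelperA, pvSS]
          simp only [hcount, hdrop]
          rw [List.range_succ_eq_map]
          simp only [List.flatMap_cons, List.map_append, List.map_flatMap, List.flatMap_map,
            List.map_map]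
          rw [ihd]
          congr 1
          rw [← List.flatMap_def]
          congr 1
          funext p
          rw [ihd]
          simp [Function.comp, String.ofList_append, List.append_assoc]

-- B's loop maps pvSS over the accumulated result
theorem pvAltLoop_eq (n : Nat) :
    ∀ rest : List Char, rest.length ≤ n → ∀ result : List String,
      pvAltLoop rest result = result.flatMap (fun r => (pvSS rest).map (fun t => r ++ String.ofList t)) := by
  induction n with
  | zero =>
      intro rest hl result
      have : rest = [] := List.eq_nil_of_length_eq_zero (Nat.le_zero.mp hl)
      subst this
      simp [pvAltLoop, pvSS]
  | succ n ih =>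
      intro rest hl result
      match rest with
      | [] => simp [pvAltLoop, pvSS]
      | c :: tl =>
          have hlen : (tl.dropWhile (fun y => y == c)).length ≤ n := by
            have := List.length_dropWhile_le (fun y => y == c) tl
            simp only [List.length_cons] at hl
            omega
          rw [pvAltLoop, pvSS]
          rw [ih _ hlen, List.flatMap_assoc]
          congr 1
          funext r
          rw [List.flatMap_map, List.map_flatMap]
          congr 1
          funext j
          simp [Function.comp, String.ofList_append, String.append_assoc]

-- ===== VERDICT (by name: the statement is the Claim_ definition above) =====
theorem get_distinct_subsets_spec : Claim_equal_get_distinct_subsets := by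
  intro s _
  unfold Spec_get_distinct_subsets get_distinct_subsets get_distinct_subsets_alt
  set arr := PySem.List.sorted s.toList (fun c => c) false with harr
  have hs : arr.Pairwise (· ≤ ·) := PySem.List.sorted_pairwise s.toList (fun c => c)
  rw [pvHelperA_eq arr.length arr (le_refl _) hs [], pvAltLoop_eq arr.length arr (le_refl _)]
  simp [String.ofList]
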